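-- pv_equiv track=rewrite | github.com/garigerahulkarunya/E3S1_AI | rabbit_leap_bfs_dfs.py | dfs
-- ===== SOURCE A (Python) =====
-- def is_goal(state):
--     if state == '<<<_>>>':
--         return True
--     else:
--         return False
--
-- def get_next_states(state):
--     next_states = []
--     state = list(state)
--     for i in range(7):
--         if state[i] == '>':
--             # move right
--             if i + 1 < 7 and state[i + 1] == '_':
--                 temp = state[:]
--                 temp[i], temp[i + 1] = temp[i + 1], temp[i]
--                 next_states.append(''.join(temp))
--             # jump over one rabbit
--             if i + 2 < 7 and state[i + 1] in ['<', '>'] and state[i + 2] == '_':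
--                 temp = state[:]
--                 temp[i], temp[i + 2] = temp[i + 2], temp[i]
--                 next_states.append(''.join(temp))
--         elif state[i] == '<':
--             # move left
--             if i - 1 >= 0 and state[i - 1] == '_':
--                 temp = state[:]
--                 temp[i], temp[i - 1] = temp[i - 1], temp[i]
--                 next_states.append(''.join(temp))
--             # jump over one rabbit
--             if i - 2 >= 0 and state[i - 1] in ['<', '>'] and state[i - 2] == '_':
--                 temp = state[:]
--                 temp[i], temp[i - 2] = temp[i - 2], temp[i]
--                 next_states.append(''.join(temp))
--     return next_states
--
-- def dfs(start):
--     stack = []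
--     stack.append((start, [start]))
--     visited = set()
--
--     while stack:
--         current, path = stack.pop()
--
--         if is_goal(current):
--             return path
--
--         for next_state in reversed(get_next_states(current)):
--             if next_state not in visited:
--                 visited.add(next_state)
--                 stack.append((next_state, path + [next_state]))
--
--     return None
-- ===== SOURCE B (Python) =====
-- def is_goal(state):
--     if state == '<<<_>>>':
--         return True
--     else:
--         return False
--
-- def get_next_states(state):
--     next_states = []
--     state = list(state)
--     for i in range(7):
--         if state[i] == '>':
--             # move right
--             if i + 1 < 7 and state[i + 1] == '_':
--                 temp = state[:]
--                 temp[i], temp[i + 1] = temp[i + 1], temp[i]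
--                 next_states.append(''.join(temp))
--             # jump over one rabbit
--             if i + 2 < 7 and state[i + 1] in ['<', '>'] and state[i + 2] == '_':
--                 temp = state[:]
--                 temp[i], temp[i + 2] = temp[i + 2], temp[i]
--                 next_states.append(''.join(temp))
--         elif state[i] == '<':
--             # move left
--             if i - 1 >= 0 and state[i - 1] == '_':
--                 temp = state[:]
--                 temp[i], temp[i - 1] = temp[i - 1], temp[i]
--                 next_states.append(''.join(temp))
--             # jump over one rabbit
--             if i - 2 >= 0 and state[i - 1] in ['<', '>'] and state[i - 2] == '_':
--                 temp = state[:]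
--                 temp[i], temp[i - 2] = temp[i - 2], temp[i]
--                 next_states.append(''.join(temp))
--     return next_states
--
-- def dfs(start):
--     # Recursive DFS instead of an explicit stack; visited is shared and children
--     # are batch-marked before recursing, mirroring A's mark-on-push discipline.
--     visited = set()
--
--     def rec(current, path):
--         if is_goal(current):
--             return path
--         children = []
--         for s in get_next_states(current):
--             if s not in visited:
--                 visited.add(s)
--                 children.append(s)
--         for c in children:
--             res = rec(c, path + [c])
--             if res is not None:
--                 return res
--         return None
--
--     return rec(start, [start])
-- ===== Notes on version B (the rewrite author's own statement) =====
-- stated objective: alternative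
-- what changed: A's explicit-stack iterative DFS is replaced by a recursive helper rec(current, path) with a shared visited set that batch-marks all unvisited children (in original order) before recursing and returns the first non-None result; same traversal, different decomposition.
import Mathlib
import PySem

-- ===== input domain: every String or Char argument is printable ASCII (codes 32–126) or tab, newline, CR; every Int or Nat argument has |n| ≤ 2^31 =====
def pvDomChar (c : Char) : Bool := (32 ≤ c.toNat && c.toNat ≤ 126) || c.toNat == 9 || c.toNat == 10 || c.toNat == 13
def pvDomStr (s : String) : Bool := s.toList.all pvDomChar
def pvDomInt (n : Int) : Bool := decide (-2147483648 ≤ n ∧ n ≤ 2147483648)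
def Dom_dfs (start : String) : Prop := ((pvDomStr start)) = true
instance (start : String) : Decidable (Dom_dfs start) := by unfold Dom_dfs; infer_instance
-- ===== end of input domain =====

-- B replaces A's explicit-stack DFS by a recursive helper with a shared visited set
-- (batch-marking children before recursing); same traversal, different decomposition.

-- ===== PORT A =====
def is_goal (state : String) : Bool := state == "<<<_>>>"

-- swap of two positions in the list copy (temp[i], temp[j] = temp[j], temp[i]);
-- exact when both indices are < cs.length (guaranteed by Pre_dfs: length ≥ 7)
def swapIdx (cs : List Char) (i j : Nat) : List Char :=
  (cs.set i (cs.getD j ' ')).set j (cs.getD i ' ')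

-- the (at most two) states appended by the body of A's `for i in range(7)` loop at cell i
def stepList (cs : List Char) (i : Nat) : List String :=
  if cs.getD i ' ' = '>' then
    (if i + 1 < 7 ∧ cs.getD (i+1) ' ' = '_' then [String.ofList (swapIdx cs i (i+1))] else [])
    ++ (if i + 2 < 7 ∧ (cs.getD (i+1) ' ' = '<' ∨ cs.getD (i+1) ' ' = '>') ∧ cs.getD (i+2) ' ' = '_'
        then [String.ofList (swapIdx cs i (i+2))] else [])
  else if cs.getD i ' ' = '<' then
    (if 1 ≤ i ∧ cs.getD (i-1) ' ' = '_' then [String.ofList (swapIdx cs i (i-1))] else [])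
    ++ (if 2 ≤ i ∧ (cs.getD (i-1) ' ' = '<' ∨ cs.getD (i-1) ' ' = '>') ∧ cs.getD (i-2) ' ' = '_'
        then [String.ofList (swapIdx cs i (i-2))] else [])
  else []

def get_next_states (s : String) : List String :=
  (List.range 7).foldl (fun acc i => acc ++ stepList s.toList i) []

-- fuel for the search loop: strictly more than the number of states A can ever pop
-- (a totality device only; the loop stops when the stack empties)
def pvFuel (start : String) : Nat := Nat.factorial start.toList.length + 1

-- A's while-loop: pop, test goal, push unvisited children of reversed(get_next_states)
def dfsLoop : Nat → List (String × List String) → PySem.Set String → Option (List String)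
  | 0, _, _ => none
  | _ + 1, [], _ => none
  | f + 1, (current, path) :: rest, visited =>
    if is_goal current then some path
    else
      let sv := (get_next_states current).reverse.foldl
        (fun (acc : List (String × List String) × PySem.Set String) ns =>
          if PySem.Set.contains acc.2 ns then acc
          else ((ns, path ++ [ns]) :: acc.1, PySem.Set.add acc.2 ns))
        (rest, visited)
      dfsLoop f sv.1 sv.2

def dfs (start : String) : Option (List String) :=
  dfsLoop (pvFuel start) [(start, [start])] PySem.Set.empty

-- ===== PORT B =====
-- B's child-collecting loop: keep (and mark) the not-yet-visited children, in order
def collectNew (xs : List String) (visited : PySem.Set String) :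
    List String × PySem.Set String :=
  xs.foldl (fun acc s =>
    if PySem.Set.contains acc.2 s then acc
    else (acc.1 ++ [s], PySem.Set.add acc.2 s)) ([], visited)

-- B's recursive helper rec(current, path) with the shared visited set threaded through;
-- fuel is the termination device only (recursion consumes one unit per call and hands
-- the remainder on; `min` only documents to the termination checker that the handed-on
-- fuel never exceeds the current one, see recBAux_goAux_fuel below)
mutual
def recBAux (f : Nat) (current : String) (path : List String) (v : PySem.Set String) :
    Option (List String) × PySem.Set String × Nat :=
  match f with
  | 0 => (none, v, 0)
  | g + 1 =>
    if is_goal current then (some path, v, g)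
    else
      let cv := collectNew (get_next_states current) v
      goAux g cv.1 path cv.2
termination_by (f, 0)
decreasing_by exact Prod.Lex.left _ _ (Nat.lt_succ_self g)

-- the `for c in children` loop: first non-None recursive result wins
def goAux (f : Nat) (cs : List String) (path : List String) (v : PySem.Set String) :
    Option (List String) × PySem.Set String × Nat :=
  match cs with
  | [] => (none, v, f)
  | c :: rest =>
    match recBAux f c (path ++ [c]) v with
    | (some res, v', f') => (some res, v', f')
    | (none, v', f') => goAux (min f' f) rest path v'
termination_by (f, cs.length + 1)
decreasing_by
  · exact Prod.Lex.right f (Nat.succ_pos _)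
  · rcases Nat.lt_or_eq_of_le (Nat.min_le_right f' f) with h | h
    · exact Prod.Lex.left _ _ h
    · rw [h]
      exact Prod.Lex.right f (Nat.lt_succ_self _)
end

def recB (f : Nat) (current : String) (path : List String) (v : PySem.Set String) :
    Option (List String) × PySem.Set String × Nat :=
  recBAux f current path v

def dfs_alt (start : String) : Option (List String) :=
  (recB (pvFuel start) start [start] PySem.Set.empty).1

-- ===== PRECONDITION & SPEC =====
-- Pre_ excludes exactly the inputs where Python A raises IndexError:
-- get_next_states indexes cells 0..6, so strings shorter than 7 raise
-- (the only goal string '<<<_>>>' has length 7, so no returning input is lost).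
def Pre_dfs (start : String) : Prop := 7 ≤ PySem.Str.len start
instance (start : String) : Decidable (Pre_dfs start) := by unfold Pre_dfs; infer_instance

def pvWitness_dfs : String := "<<<_>>>"

def Spec_dfs (start : String) (out : Option (List String)) : Prop := out = dfs_alt start
instance (start : String) (out : Option (List String)) : Decidable (Spec_dfs start out) := by
  unfold Spec_dfs; infer_instance

-- ===== CLAIM (what is proved, stated in full; the proofs are below) =====
def Claim_equal_dfs : Prop := ∀ (start : String), Dom_dfs start → Pre_dfs start → Spec_dfs start (dfs start)

-- ===== LEMMAS AND PROOFS =====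

-- proof-side wrapper for the inner child loop of B's recursion
def go (f : Nat) (cs : List String) (path : List String) (v : PySem.Set String) :
    Option (List String) × PySem.Set String × Nat :=
  goAux f cs path v

-- simple equation lemmas for the B-side recursion
theorem recB_zero (c : String) (p : List String) (v : PySem.Set String) :
    recB 0 c p v = (none, v, 0) := by
  simp [recB, recBAux]

theorem recB_succ (g : Nat) (c : String) (p : List String) (v : PySem.Set String) :
    recB (g+1) c p v =
      if is_goal c then (some p, v, g)
      else go g (collectNew (get_next_states c) v).1 p (collectNew (get_next_states c) v).2 := by
  rw [recB, recBAux]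
  split <;> simp [go]

theorem go_nil (f : Nat) (p : List String) (v : PySem.Set String) :
    go f [] p v = (none, v, f) := by
  simp [go, goAux]

-- the handed-on fuel is bounded by the current fuel (so the `min` clamp never bites)
theorem fuel_bound :
    ∀ f : Nat,
      (∀ (c : String) (p : List String) (v : PySem.Set String),
        (recBAux f c p v).2.2 < f ∨ (f = 0 ∧ (recBAux f c p v).2.2 = 0))
      ∧ (∀ (cs : List String) (p : List String) (v : PySem.Set String),
        (goAux f cs p v).2.2 ≤ f) := by
  intro f
  induction f using Nat.strong_induction_on with
  | _ f ih =>
    have hrec : ∀ (c : String) (p : List String) (v : PySem.Set String),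
        (recBAux f c p v).2.2 < f ∨ (f = 0 ∧ (recBAux f c p v).2.2 = 0) := by
      intro c p v
      cases f with
      | zero => right; rw [recBAux]; exact ⟨rfl, rfl⟩
      | succ g =>
        left
        rw [recBAux]
        split
        · exact Nat.lt_succ_self g
        · exact Nat.lt_succ_of_le ((ih g (Nat.lt_succ_self g)).2 _ _ _)
    refine ⟨hrec, ?_⟩
    intro cs
    induction cs with
    | nil => intro p v; rw [goAux]
    | cons c rest ihcs =>
      intro p v
      rw [goAux]
      rcases hr : recBAux f c (p ++ [c]) v with ⟨o, v', f'⟩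
      have hfb : f' < f ∨ (f = 0 ∧ f' = 0) := by
        have := hrec c (p ++ [c]) v
        rw [hr] at this
        exact this
      cases o with
      | some r => simp; omega
      | none =>
        simp only
        rcases Nat.lt_or_eq_of_le (Nat.min_le_right f' f) with h | h
        · exact le_of_lt (lt_of_le_of_lt ((ih _ h).2 rest p v') h)
        · rw [h]; exact ihcs p v'

theorem recB_fuel_lt (f : Nat) (c : String) (p : List String) (v : PySem.Set String)
    (hf : 0 < f) : (recB f c p v).2.2 < f := by
  rcases (fuel_bound f).1 c p v with h | h
  · exact h
  · omega

theorem go_cons (f : Nat) (c : String) (rest p : List String) (v : PySem.Set String) :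
    go f (c :: rest) p v =
      match recB f c (p ++ [c]) v with
      | (some res, v', f') => (some res, v', f')
      | (none, v', f') => go f' rest p v' := by
  rw [go, goAux]
  rcases hrec : recBAux f c (p ++ [c]) v with ⟨o, vv, ff⟩
  have hmin : min ff f = ff := by
    rcases (fuel_bound f).1 c (p ++ [c]) v with h | h
    · rw [hrec] at h; exact Nat.min_eq_left (le_of_lt h)
    · rw [hrec] at h
      have h2 : ff = 0 := h.2
      rw [h2, h.1]
      rfl
  cases o <;> simp [recB, hrec, go, hmin]

-- proof-side mirror of A's loop that runs B's recursion entry by entry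
def runStack : Nat → List (String × List String) → PySem.Set String → Option (List String)
  | 0, _, _ => none
  | _ + 1, [], _ => none
  | f + 1, (c, p) :: rest, v =>
    match h : recB (f + 1) c p v with
    | (some r, _, _) => some r
    | (none, v', f') => runStack f' rest v'
termination_by f stack _ => (f, stack.length)
decreasing_by
  have := recB_fuel_lt (f + 1) c p v (Nat.succ_pos f)
  rw [h] at this
  exact Prod.Lex.left _ _ this

theorem runStack_nil (f : Nat) (v : PySem.Set String) : runStack f [] v = none := by
  cases f <;> simp [runStack]

-- sets observed only through membership
def SetEq (a b : PySem.Set String) : Prop := ∀ y : String, (y ∈ a ↔ y ∈ b)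

theorem contains_congr {a b : PySem.Set String} (h : SetEq a b) (y : String) :
    PySem.Set.contains a y = PySem.Set.contains b y := by
  rw [Bool.eq_iff_iff]
  simp only [PySem.Set.contains_iff]
  exact h y

theorem contains_add_iff (s : PySem.Set String) (x y : String) :
    (PySem.Set.contains (PySem.Set.add s x) y = true) ↔
      (PySem.Set.contains s y = true ∨ y = x) := by
  simp only [PySem.Set.contains_iff]
  exact PySem.Set.mem_add s x y

-- unvisited children of a state, w.r.t. a visited set
def newOf (v : PySem.Set String) (cs : List String) : List String :=
  cs.filter (fun x => !(PySem.Set.contains v x))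

theorem newOf_congr {a b : PySem.Set String} (h : SetEq a b) (cs : List String) :
    newOf a cs = newOf b cs := by
  unfold newOf
  exact List.filter_congr (fun x _ => by rw [contains_congr h])

theorem contains_add_ne (v : PySem.Set String) (x c : String) (hne : x ≠ c) :
    PySem.Set.contains (PySem.Set.add v c) x = PySem.Set.contains v x := by
  rw [Bool.eq_iff_iff, contains_add_iff]
  constructor
  · rintro (h | h)
    · exact h
    · exact absurd h hne
  · exact Or.inl

theorem newOf_cons_mem {v : PySem.Set String} {c : String} (rest : List String)
    (hc : PySem.Set.contains v c = true) : newOf v (c :: rest) = newOf v rest := by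
  simp [newOf, (PySem.Set.contains_iff v c).mp hc]

theorem newOf_cons_new {v : PySem.Set String} {c : String} (rest : List String)
    (hc : PySem.Set.contains v c = false) : newOf v (c :: rest) = c :: newOf v rest := by
  have : c ∉ v := fun h => by simp at hc; exact hc h
  simp [newOf, this]

theorem newOf_add_of_not_mem {c : String} {rest : List String} (v : PySem.Set String)
    (hc : c ∉ rest) : newOf (PySem.Set.add v c) rest = newOf v rest := by
  unfold newOf
  refine List.filter_congr (fun x hx => ?_)
  rw [contains_add_ne v x c (fun h => hc (h ▸ hx))]

theorem mem_newOf {y : String} {v : PySem.Set String} {cs : List String} :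
    y ∈ newOf v cs ↔ y ∈ cs ∧ PySem.Set.contains v y = false := by
  simp [newOf]

-- characterisation of A's reversed push loop (duplicate-free children)
theorem pushA_char (p : List String) :
    ∀ (cs : List String), cs.Nodup → ∀ (rest : List (String × List String)) (v : PySem.Set String),
      (cs.reverse.foldl
        (fun (acc : List (String × List String) × PySem.Set String) ns =>
          if PySem.Set.contains acc.2 ns then acc
          else ((ns, p ++ [ns]) :: acc.1, PySem.Set.add acc.2 ns)) (rest, v)).1
        = (newOf v cs).map (fun c => (c, p ++ [c])) ++ rest
      ∧ ∀ y, ((cs.reverse.foldl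
          (fun (acc : List (String × List String) × PySem.Set String) ns =>
            if PySem.Set.contains acc.2 ns then acc
            else ((ns, p ++ [ns]) :: acc.1, PySem.Set.add acc.2 ns)) (rest, v)).2.contains y = true
          ↔ (v.contains y = true ∨ y ∈ newOf v cs)) := by
  intro cs
  induction cs with
  | nil => intro _ rest v; exact ⟨by simp [newOf], fun y => by simp [newOf]⟩
  | cons c cs' ih =>
    intro hnd rest v
    have hcr : c ∉ cs' := (List.nodup_cons.mp hnd).1
    rcases ih (List.nodup_cons.mp hnd).2 rest v with ⟨h1, h2⟩
    rw [List.reverse_cons, List.foldl_concat]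
    by_cases hv : PySem.Set.contains v c = true
    · have hct : ((cs'.reverse.foldl
          (fun (acc : List (String × List String) × PySem.Set String) ns =>
            if PySem.Set.contains acc.2 ns then acc
            else ((ns, p ++ [ns]) :: acc.1, PySem.Set.add acc.2 ns)) (rest, v)).2.contains c) = true :=
        (h2 c).mpr (Or.inl hv)
      rw [newOf_cons_mem cs' hv]
      simp only [hct, if_pos]
      exact ⟨h1, h2⟩
    · have hvf : PySem.Set.contains v c = false := by simpa using hv
      have hcf : ((cs'.reverse.foldl
          (fun (acc : List (String × List String) × PySem.Set String) ns =>
            if PySem.Set.contains acc.2 ns then acc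
            else ((ns, p ++ [ns]) :: acc.1, PySem.Set.add acc.2 ns)) (rest, v)).2.contains c) = false := by
        rcases Bool.eq_false_or_eq_true ((cs'.reverse.foldl
          (fun (acc : List (String × List String) × PySem.Set String) ns =>
            if PySem.Set.contains acc.2 ns then acc
            else ((ns, p ++ [ns]) :: acc.1, PySem.Set.add acc.2 ns)) (rest, v)).2.contains c) with hb | hb
        · rcases (h2 c).mp hb with h | h
          · rw [h] at hvf; cases hvf
          · exact absurd (mem_newOf.mp h).1 hcr
        · exact hb
      rw [newOf_cons_new cs' hvf]
      simp only [hcf, Bool.false_eq_true, if_neg, not_false_iff]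
      constructor
      · rw [h1]; simp
      · intro y
        rw [contains_add_iff, h2 y, List.mem_cons]
        tauto

-- characterisation of B's collecting loop (duplicate-free children)
theorem collect_loop :
    ∀ (cs : List String), cs.Nodup → ∀ (a : List String) (v : PySem.Set String),
      ((cs.foldl (fun acc s => if PySem.Set.contains acc.2 s then acc
          else (acc.1 ++ [s], PySem.Set.add acc.2 s)) (a, v)).1 = a ++ newOf v cs)
      ∧ ∀ y, ((cs.foldl (fun acc s => if PySem.Set.contains acc.2 s then acc
          else (acc.1 ++ [s], PySem.Set.add acc.2 s)) (a, v)).2.contains y = true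
          ↔ (v.contains y = true ∨ y ∈ newOf v cs)) := by
  intro cs
  induction cs with
  | nil => intro _ a v; simp [newOf]
  | cons c rest ih =>
    intro hnd a v
    have hcr : c ∉ rest := (List.nodup_cons.mp hnd).1
    have hnd' : rest.Nodup := (List.nodup_cons.mp hnd).2
    by_cases hc : PySem.Set.contains v c = true
    · simp only [List.foldl_cons, hc, if_pos]
      rcases ih hnd' a v with ⟨h1, h2⟩
      rw [newOf_cons_mem rest hc]
      exact ⟨h1, h2⟩
    · have hc' : PySem.Set.contains v c = false := by simpa using hc
      simp only [List.foldl_cons, hc', Bool.false_eq_true, if_neg, not_false_iff]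
      rcases ih hnd' (a ++ [c]) (PySem.Set.add v c) with ⟨h1, h2⟩
      rw [newOf_add_of_not_mem v hcr] at h1 h2
      constructor
      · rw [h1, newOf_cons_new rest hc']; simp
      · intro y
        rw [h2 y, newOf_cons_new rest hc', contains_add_iff]
        constructor
        · rintro ((h | h) | h)
          · exact Or.inl h
          · exact Or.inr (h ▸ List.mem_cons_self ..)
          · exact Or.inr (List.mem_cons_of_mem _ h)
        · rintro (h | h)
          · exact Or.inl (Or.inl h)
          · rcases List.mem_cons.mp h with h | h
            · exact Or.inl (Or.inr h)
            · exact Or.inr h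

theorem collectB_char (cs : List String) (hnd : cs.Nodup) (v : PySem.Set String) :
    (collectNew cs v).1 = newOf v cs
    ∧ ∀ y, ((collectNew cs v).2.contains y = true ↔ (v.contains y = true ∨ y ∈ newOf v cs)) := by
  have h := collect_loop cs hnd [] v
  simpa [collectNew] using h

-- get_next_states: flatMap form, duplicate-freedom, length preservation
theorem gns_flatMap (s : String) :
    get_next_states s = (List.range 7).flatMap (stepList s.toList) := by
  unfold get_next_states
  rw [PySem.List.foldl_append_eq_flatMap]
  simp

theorem getD_swapIdx (cs : List Char) (i j k : Nat) (hi : i < cs.length) (hj : j < cs.length) :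
    (swapIdx cs i j).getD k ' ' =
      if k = j then cs.getD i ' ' else if k = i then cs.getD j ' ' else cs.getD k ' ' := by
  by_cases hkj : k = j
  · subst hkj
    simp [swapIdx, List.getD_eq_getElem?_getD, List.length_set, hj]
  · by_cases hki : k = i
    · subst hki
      simp [swapIdx, List.getD_eq_getElem?_getD, List.length_set, hi, Ne.symm hkj, hkj]
    · simp [swapIdx, List.getD_eq_getElem?_getD, hkj, hki, Ne.symm hkj, Ne.symm hki]

theorem length_swapIdx (cs : List Char) (i j : Nat) : (swapIdx cs i j).length = cs.length := by
  simp [swapIdx]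

-- every state appended at cell i swaps the mover at i with a blank at some a ≠ i, a < 7
theorem stepList_mem {cs : List Char} {i : Nat} {x : String} (hi : i < 7)
    (hx : x ∈ stepList cs i) :
    ∃ a, a < 7 ∧ a ≠ i ∧ cs.getD a ' ' = '_' ∧ cs.getD i ' ' ≠ '_'
      ∧ x = String.ofList (swapIdx cs i a) := by
  unfold stepList at hx
  by_cases hgt : cs.getD i ' ' = '>'
  · rw [if_pos hgt] at hx
    rcases List.mem_append.mp hx with hx | hx
    · split_ifs at hx with hg
      · simp only [List.mem_singleton] at hx
        exact ⟨i + 1, hg.1, by omega, hg.2, by rw [hgt]; decide, hx⟩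
      · simp at hx
    · split_ifs at hx with hg
      · simp only [List.mem_singleton] at hx
        exact ⟨i + 2, hg.1, by omega, hg.2.2, by rw [hgt]; decide, hx⟩
      · simp at hx
  · rw [if_neg hgt] at hx
    by_cases hlt : cs.getD i ' ' = '<'
    · rw [if_pos hlt] at hx
      rcases List.mem_append.mp hx with hx | hx
      · split_ifs at hx with hg
        · simp only [List.mem_singleton] at hx
          exact ⟨i - 1, by omega, by omega, hg.2, by rw [hlt]; decide, hx⟩
        · simp at hx
      · split_ifs at hx with hg
        · simp only [List.mem_singleton] at hx
          exact ⟨i - 2, by omega, by omega, hg.2.2, by rw [hlt]; decide, hx⟩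
        · simp at hx
    · rw [if_neg hlt] at hx
      simp at hx

theorem stepList_nodup (cs : List Char) (i : Nat) : (stepList cs i).Nodup := by
  unfold stepList
  split_ifs <;> simp_all

theorem stepList_disjoint {cs : List Char} (hlen : 7 ≤ cs.length) {i j : Nat}
    (hi : i < 7) (hj : j < 7) (hij : i ≠ j) {x : String}
    (hxi : x ∈ stepList cs i) (hxj : x ∈ stepList cs j) : False := by
  obtain ⟨a, ha7, hai, haB, hiB, hxa⟩ := stepList_mem hi hxi
  obtain ⟨b, hb7, hbj, hbB, hjB, hxb⟩ := stepList_mem hj hxj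
  have heq : swapIdx cs i a = swapIdx cs j b := String.ofList_inj.mp (hxa ▸ hxb)
  have h1 := getD_swapIdx cs i a i (by omega) (by omega)
  have h2 := getD_swapIdx cs j b i (by omega) (by omega)
  rw [heq] at h1
  rw [h2] at h1
  rw [if_neg (Ne.symm hai), if_pos rfl] at h1
  by_cases hib : i = b
  · rw [if_pos hib] at h1
    exact hjB (h1.trans haB)
  · rw [if_neg hib, if_neg hij] at h1
    exact hiB (h1.trans haB)

theorem gns_nodup (s : String) (h : 7 ≤ s.toList.length) : (get_next_states s).Nodup := by
  rw [gns_flatMap]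
  refine List.nodup_flatMap.mpr ⟨fun i _ => stepList_nodup s.toList i, ?_⟩
  refine List.Pairwise.imp_of_mem ?_ (List.pairwise_lt_range (n := 7))
  intro i j hi hj hlt x hxi hxj
  exact stepList_disjoint h (List.mem_range.mp hi) (List.mem_range.mp hj)
    (Nat.ne_of_lt hlt) hxi hxj

theorem gns_length (s : String) (x : String) (hx : x ∈ get_next_states s) :
    x.toList.length = s.toList.length := by
  rw [gns_flatMap] at hx
  obtain ⟨i, hi, hxi⟩ := List.mem_flatMap.mp hx
  obtain ⟨a, _, _, _, _, hxa⟩ := stepList_mem (List.mem_range.mp hi) hxi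
  rw [hxa]
  simp [length_swapIdx]

theorem go_zero (cs : List String) (p : List String) (v : PySem.Set String) :
    go 0 cs p v = (none, v, 0) := by
  induction cs with
  | nil => exact go_nil 0 p v
  | cons c rest ih => rw [go_cons, recB_zero]; exact ih

theorem runStack_cons (g : Nat) (c : String) (p : List String)
    (rest : List (String × List String)) (v : PySem.Set String) :
    runStack (g + 1) ((c, p) :: rest) v =
      match recB (g + 1) c p v with
      | (some r, _, _) => some r
      | (none, v', f') => runStack f' rest v' := by
  rw [runStack]
  split <;> rename_i heq <;> rw [heq]

theorem runStack_append (kept : List String) :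
    ∀ (f : Nat) (p : List String) (rest : List (String × List String)) (v : PySem.Set String),
      runStack f (kept.map (fun c => (c, p ++ [c])) ++ rest) v =
        match go f kept p v with
        | (some r, _, _) => some r
        | (none, v', f') => runStack f' rest v' := by
  induction kept with
  | nil =>
    intro f p rest v
    rw [go_nil]
    simp
  | cons c kept' ih =>
    intro f p rest v
    rw [go_cons]
    cases f with
    | zero =>
      rw [recB_zero]
      simp [go_zero, runStack]
    | succ g =>
      simp only [List.map_cons, List.cons_append]
      rw [runStack_cons]
      rcases hr : recB (g + 1) c (p ++ [c]) v with ⟨o, v1, f1⟩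
      cases o with
      | some r => simp
      | none => exact ih f1 p rest v1

-- the main bridge: A's loop = B's recursion run on each stack entry
theorem main_bridge :
    ∀ (f : Nat) (stack : List (String × List String)) (vA vB : PySem.Set String),
      SetEq vA vB → (∀ e ∈ stack, 7 ≤ e.1.toList.length) →
      dfsLoop f stack vA = runStack f stack vB := by
  intro f
  induction f using Nat.strong_induction_on with
  | _ f ih =>
    intro stack vA vB hset hwf
    match f, stack with
    | 0, stack => simp [dfsLoop, runStack]
    | g + 1, [] => simp [dfsLoop, runStack]
    | g + 1, (c, p) :: rest =>
      have hc7 : 7 ≤ c.toList.length := hwf (c, p) (List.mem_cons_self ..)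
      by_cases hg : is_goal c = true
      · rw [runStack_cons, recB_succ]
        simp [dfsLoop, hg]
      · have hgf : is_goal c = false := by simpa using hg
        have hnd := gns_nodup c hc7
        rcases pushA_char p (get_next_states c) hnd rest vA with ⟨hA1, hA2⟩
        rcases collectB_char (get_next_states c) hnd vB with ⟨hB1, hB2⟩
        have hFeq : newOf vA (get_next_states c) = newOf vB (get_next_states c) :=
          newOf_congr hset _
        have hset' : SetEq ((get_next_states c).reverse.foldl
            (fun (acc : List (String × List String) × PySem.Set String) ns =>
              if PySem.Set.contains acc.2 ns then acc
              else ((ns, p ++ [ns]) :: acc.1, PySem.Set.add acc.2 ns)) (rest, vA)).2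
            (collectNew (get_next_states c) vB).2 := by
          intro y
          rw [← PySem.Set.contains_iff, ← PySem.Set.contains_iff, hA2 y, hB2 y,
            ← PySem.Set.contains_iff, ← PySem.Set.contains_iff, hFeq]
          constructor
          · rintro (h | h)
            · exact Or.inl ((hset y).mp (PySem.Set.contains_iff _ _ |>.mp h) |>
                (PySem.Set.contains_iff _ _).mpr)
            · exact Or.inr h
          · rintro (h | h)
            · exact Or.inl ((hset y).mpr (PySem.Set.contains_iff _ _ |>.mp h) |>
                (PySem.Set.contains_iff _ _).mpr)
            · exact Or.inr h
        have hwf' : ∀ e ∈ (newOf vA (get_next_states c)).map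
            (fun c' => (c', p ++ [c'])) ++ rest, 7 ≤ e.1.toList.length := by
          intro e he
          rcases List.mem_append.mp he with he | he
          · obtain ⟨x, hx, hex⟩ := List.mem_map.mp he
            have hxg : x ∈ get_next_states c := (mem_newOf.mp hx).1
            rw [← hex]
            simpa [gns_length c x hxg] using hc7
          · exact hwf e (List.mem_cons_of_mem _ he)
        show dfsLoop (g + 1) ((c, p) :: rest) vA = _
        rw [dfsLoop]
        simp only [hgf, Bool.false_eq_true, if_neg, not_false_iff]
        rw [hA1]
        rw [ih g (Nat.lt_succ_self g) _ _ _ hset' hwf']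
        rw [runStack_append]
        rw [runStack_cons, recB_succ, hgf]
        simp only [Bool.false_eq_true, if_neg, not_false_iff]
        rw [hB1, ← hFeq]

-- ===== VERDICT (by name: the statement is the Claim_ definition above) =====
theorem dfs_spec : Claim_equal_dfs := by
  intro start _ hpre
  unfold Spec_dfs dfs dfs_alt
  have hlen : 7 ≤ start.toList.length := by
    have := hpre
    unfold Pre_dfs at this
    simpa [PySem.Str.len] using this
  have h := main_bridge (pvFuel start) [(start, [start])] PySem.Set.empty PySem.Set.empty
    (fun _ => Iff.rfl) (by intro e he; simp at he; subst he; exact hlen)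
  rw [h]
  show runStack (Nat.factorial start.toList.length + 1) [(start, [start])] PySem.Set.empty
    = (recB (pvFuel start) start [start] PySem.Set.empty).1
  rw [runStack_cons]
  show _ = (recB (Nat.factorial start.toList.length + 1) start [start] PySem.Set.empty).1
  rcases hr : recB (Nat.factorial start.toList.length + 1) start [start] PySem.Set.empty
    with ⟨o, v1, f1⟩
  cases o <;> simp [runStack_nil]
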